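-- pv_equiv track=rewrite | github.com/antosquicciarini/cnd_early_stopping_label_noise | programs/early_stopping_performance.py | filter_experiments
-- ===== SOURCE A (Python) =====
-- def filter_experiments(data: dict, filters: set) -> dict:
--     if not filters:
--         return data
--     filtered_data = {}
--     for experiment, details in data.items():
--         if details.get("args"):
--             include = all(details["args"].get(key) == value for key, value in filters)
--             if include:
--                 filtered_data[experiment] = details
--     return filtered_data
-- ===== SOURCE B (Python) =====
-- def filter_experiments(data: dict, filters: set) -> dict:
--     result = data
--     for key, value in filters:
--         result = {e: d for e, d in result.items()
--                   if d.get("args") and d["args"].get(key) == value}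
--     return result
-- ===== Notes on version B (the rewrite author's own statement) =====
-- stated objective: alternative
-- what changed: Replaces the single pass with an all()-conjunction over filters by progressive narrowing: k successive dict-comprehension passes, one per filter, each rebuilding the result; the empty-filters case falls out of the loop never running.
import Mathlib
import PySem

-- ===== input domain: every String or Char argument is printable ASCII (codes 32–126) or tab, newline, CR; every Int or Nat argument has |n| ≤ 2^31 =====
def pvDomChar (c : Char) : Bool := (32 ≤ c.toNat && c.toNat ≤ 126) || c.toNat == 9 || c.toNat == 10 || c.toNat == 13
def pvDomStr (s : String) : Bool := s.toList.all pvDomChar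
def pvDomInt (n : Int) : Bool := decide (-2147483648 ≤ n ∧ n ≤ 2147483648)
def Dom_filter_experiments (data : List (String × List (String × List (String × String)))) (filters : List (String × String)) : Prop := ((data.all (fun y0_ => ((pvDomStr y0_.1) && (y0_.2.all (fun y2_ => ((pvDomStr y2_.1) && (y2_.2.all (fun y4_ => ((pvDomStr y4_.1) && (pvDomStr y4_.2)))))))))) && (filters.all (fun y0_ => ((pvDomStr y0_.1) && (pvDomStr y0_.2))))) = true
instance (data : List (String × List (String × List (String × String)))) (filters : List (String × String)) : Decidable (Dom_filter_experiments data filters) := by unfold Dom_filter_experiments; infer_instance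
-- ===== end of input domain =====

-- B re-implements the filter as progressive narrowing (one filtering pass per filter) instead of A's single pass with an all()-conjunction; equivalence is about return values (neither mutates).

-- ===== PORT A =====
-- dict .get(k) on the association-list encoding of a Python dict
def pvDGet {α : Type} (d : List (String × α)) (k : String) : Option α :=
  (PySem.Dict.mk d).get? k

def filter_experiments (data : List (String × List (String × List (String × String)))) (filters : List (String × String)) : List (String × List (String × List (String × String))) :=
  if filters.isEmpty then data
  else
    (data.foldl (fun (fd : PySem.Dict String (List (String × List (String × String)))) p =>
        match pvDGet p.2 "args" with
        | none => fd                                  -- details.get("args") is None: falsy, skip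
        | some args =>
          if args.isEmpty then fd                     -- empty args dict: falsy, skip
          else if filters.all (fun kv => pvDGet args kv.1 == some kv.2)
               then fd.insert p.1 p.2 else fd)
      PySem.Dict.empty).items

-- ===== PORT B =====
-- one narrowing pass: {e: d for e, d in result.items() if d.get("args") and d["args"].get(key) == value}
def pvPass (result : List (String × List (String × List (String × String)))) (kv : String × String) : List (String × List (String × List (String × String))) :=
  (result.foldl (fun (acc : PySem.Dict String (List (String × List (String × String)))) p =>
      if (match pvDGet p.2 "args" with
          | none => false
          | some args => !args.isEmpty && (pvDGet args kv.1 == some kv.2))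
      then acc.insert p.1 p.2 else acc)
    PySem.Dict.empty).items

def filter_experiments_alt (data : List (String × List (String × List (String × String)))) (filters : List (String × String)) : List (String × List (String × List (String × String))) :=
  filters.foldl pvPass data

-- ===== PRECONDITION & SPEC =====
-- Pre_ excludes association lists with duplicate experiment keys: a Python dict cannot contain
-- duplicate keys, so such inputs do not encode any input A accepts, and the ports'
-- overwrite-vs-keep behaviour on them is an artefact of the encoding.
def Pre_filter_experiments (data : List (String × List (String × List (String × String)))) (_filters : List (String × String)) : Prop :=
  (data.map Prod.fst).Nodup

instance (data : List (String × List (String × List (String × String)))) (filters : List (String × String)) : Decidable (Pre_filter_experiments data filters) := by unfold Pre_filter_experiments; infer_instance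

def pvWitness_filter_experiments : (List (String × List (String × List (String × String)))) × (List (String × String)) :=
  ([("e1", [("args", [("k", "v")])]), ("e2", [("args", [("k", "w")])])], [("k", "v")])

def Spec_filter_experiments (data : List (String × List (String × List (String × String)))) (filters : List (String × String)) (out : List (String × List (String × List (String × String)))) : Prop := out = filter_experiments_alt data filters
instance (data : List (String × List (String × List (String × String)))) (filters : List (String × String)) (out : List (String × List (String × List (String × String)))) : Decidable (Spec_filter_experiments data filters out) := by unfold Spec_filter_experiments; infer_instance

-- ===== CLAIM (what is proved, stated in full; the proofs are below) =====
def Claim_equal_filter_experiments : Prop := ∀ (data : List (String × List (String × List (String × String)))) (filters : List (String × String)), Dom_filter_experiments data filters → Pre_filter_experiments data filters → Spec_filter_experiments data filters (filter_experiments data filters)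

-- ===== LEMMAS AND PROOFS =====

-- the per-filter predicate B applies on each pass
def pvCond (kv : String × String) (details : List (String × List (String × String))) : Bool :=
  match pvDGet details "args" with
  | none => false
  | some args => !args.isEmpty && (pvDGet args kv.1 == some kv.2)

-- a fold that conditionally inserts fresh, pairwise-distinct keys is a filter
theorem pvFoldInsertFilter (c : (String × List (String × List (String × String))) → Bool)
    (l : List (String × List (String × List (String × String))))
    (d : PySem.Dict String (List (String × List (String × String))))
    (h : (d.keys ++ l.map Prod.fst).Nodup) :
    (l.foldl (fun acc p => if c p then acc.insert p.1 p.2 else acc) d).items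
      = d.items ++ l.filter c := by
  induction l generalizing d with
  | nil => simp
  | cons p t ih =>
    simp only [List.map_cons, List.foldl_cons] at *
    by_cases hc : c p
    · have hfresh : d.contains p.1 = false := by
        have hnm : p.1 ∉ d.keys := by
          intro hm
          exact (List.nodup_append.mp h).2.2 _ hm _ (List.mem_cons_self ..) rfl
        simp [PySem.Dict.contains_eq_decide_mem_keys, hnm]
      rw [if_pos hc, ih]
      · rw [PySem.Dict.items_insert_of_not_contains _ _ hfresh]
        simp [hc]
      · rw [PySem.Dict.keys_insert_of_not_contains _ _ hfresh]
        have h' := h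
        rw [show d.keys ++ p.1 :: t.map Prod.fst = (d.keys ++ [p.1]) ++ t.map Prod.fst by simp] at h'
        exact h'
    · rw [if_neg hc, ih]
      · simp [hc]
      · have h' := h
        rw [List.nodup_append] at h' ⊢
        refine ⟨h'.1, (List.nodup_cons.mp h'.2.1).2, ?_⟩
        intro a ha b hb
        exact h'.2.2 _ ha _ (List.mem_cons_of_mem _ hb)

-- one B-pass on a duplicate-free association list is a plain filter
theorem pvPass_eq_filter (l : List (String × List (String × List (String × String)))) (kv : String × String)
    (h : (l.map Prod.fst).Nodup) :
    pvPass l kv = l.filter (fun p => pvCond kv p.2) := by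
  unfold pvPass
  have := pvFoldInsertFilter (fun p => pvCond kv p.2) l PySem.Dict.empty (by simpa using h)
  simpa [pvCond] using this

-- A's fold on a duplicate-free association list (nonempty filters) is a filter by the conjunction
theorem pvA_eq_filter (data : List (String × List (String × List (String × String)))) (filters : List (String × String))
    (h : (data.map Prod.fst).Nodup) (hf : filters.isEmpty = false) :
    filter_experiments data filters
      = data.filter (fun p => filters.all (fun kv => pvCond kv p.2)) := by
  unfold filter_experiments
  rw [if_neg (by simp [hf])]
  have hbody : ∀ (fd : PySem.Dict String (List (String × List (String × String))))
      (p : String × List (String × List (String × String))),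
      (match pvDGet p.2 "args" with
       | none => fd
       | some args =>
         if args.isEmpty then fd
         else if filters.all (fun kv => pvDGet args kv.1 == some kv.2)
              then fd.insert p.1 p.2 else fd)
      = if filters.all (fun kv => pvCond kv p.2) then fd.insert p.1 p.2 else fd := by
    intro fd p
    cases hg : pvDGet p.2 "args" with
    | none =>
      cases filters with
      | nil => simp at hf
      | cons f0 ft => simp [pvCond, hg]
    | some args =>
      by_cases he : args.isEmpty
      · cases filters with
        | nil => simp at hf
        | cons f0 ft => simp [pvCond, hg, he]
      · have he' : args.isEmpty = false := by simpa using he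
        have hfun : (fun kv : String × String => pvCond kv p.2)
            = (fun kv => pvDGet args kv.1 == some kv.2) := by
          funext kv; simp [pvCond, hg, he']
        rw [hfun]
        simp only [hg]
        rw [if_neg (by simp [he'])]
  have := pvFoldInsertFilter (fun p => filters.all (fun kv => pvCond kv p.2)) data
      PySem.Dict.empty (by simpa using h)
  calc (data.foldl (fun fd p =>
          (match pvDGet p.2 "args" with
           | none => fd
           | some args =>
             if args.isEmpty then fd
             else if filters.all (fun kv => pvDGet args kv.1 == some kv.2)
                  then fd.insert p.1 p.2 else fd)) PySem.Dict.empty).items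
      = (data.foldl (fun fd p => if filters.all (fun kv => pvCond kv p.2) then fd.insert p.1 p.2 else fd) PySem.Dict.empty).items := by
        congr 1
        apply PySem.List.foldl_congr_mem
        intro fd p _
        exact hbody fd p
    _ = data.filter (fun p => filters.all (fun kv => pvCond kv p.2)) := by simpa using this

-- B on a duplicate-free association list is the filter by the conjunction of all filters
theorem pvB_eq_filter (filters : List (String × String)) (data : List (String × List (String × List (String × String))))
    (h : (data.map Prod.fst).Nodup) :
    filter_experiments_alt data filters
      = data.filter (fun p => filters.all (fun kv => pvCond kv p.2)) := by
  induction filters generalizing data with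
  | nil => simp [filter_experiments_alt]
  | cons f ft ih =>
    unfold filter_experiments_alt at *
    simp only [List.foldl_cons]
    rw [pvPass_eq_filter data f h, ih]
    · rw [List.filter_filter]
      apply List.filter_congr
      intro p _
      simp [Bool.and_comm]
    · exact h.sublist (List.Sublist.map Prod.fst List.filter_sublist)

-- ===== VERDICT (by name: the statement is the Claim_ definition above) =====
theorem filter_experiments_spec : Claim_equal_filter_experiments := by
  intro data filters _ hpre
  unfold Spec_filter_experiments
  by_cases hf : filters.isEmpty
  · have : filters = [] := by simpa using hf
    subst this
    simp [filter_experiments, filter_experiments_alt]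
  · rw [pvA_eq_filter data filters hpre (by simpa using hf),
        pvB_eq_filter filters data hpre]
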